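-- pv_equiv track=rewrite | github.com/sanjitdp/schreier-graphs | src/schreier-graph-data/schreier-graph-data.py | odometer
-- ===== SOURCE A (Python) =====
-- from copy import deepcopy
--
-- def odometer(cycle, v):
--     if not v:
--         return ()
--     if v[0] in cycle:
--         target = deepcopy(v)
--         if v[0] == cycle[-1]:
--             return cycle[0], *odometer(cycle, v[1:])
--         else:
--             target[0] = cycle[cycle.index(v[0]) + 1]
--             return tuple(target)
--     else:
--         return tuple(v)
-- ===== SOURCE B (Python) =====
-- def odometer(cycle, v):
--     result = list(v)
--     for i in range(len(v)):
--         d = v[i]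
--         if d not in cycle:
--             break
--         if d == cycle[-1]:
--             result[i] = cycle[0]
--         else:
--             result[i] = cycle[cycle.index(d) + 1]
--             break
--     return tuple(result)
-- ===== Notes on version B (the rewrite author's own statement) =====
-- stated objective: alternative
-- what changed: Replaces A's recursion (deepcopy + tuple-splice per carry) with a single iterative odometer pass that mutates a copied list in place and breaks at the first non-carry digit.
import Mathlib
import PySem

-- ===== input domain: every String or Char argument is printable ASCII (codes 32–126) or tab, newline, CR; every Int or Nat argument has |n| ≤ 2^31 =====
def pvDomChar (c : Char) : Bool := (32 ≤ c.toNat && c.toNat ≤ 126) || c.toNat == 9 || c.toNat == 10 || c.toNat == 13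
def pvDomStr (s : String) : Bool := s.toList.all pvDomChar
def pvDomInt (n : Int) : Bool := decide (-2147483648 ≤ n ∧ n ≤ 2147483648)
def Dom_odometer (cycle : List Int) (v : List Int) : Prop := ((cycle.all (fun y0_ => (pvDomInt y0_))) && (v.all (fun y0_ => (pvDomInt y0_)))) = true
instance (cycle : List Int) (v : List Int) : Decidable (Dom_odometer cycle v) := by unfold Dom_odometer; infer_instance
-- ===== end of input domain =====

-- B replaces A's recursion (copy + tuple-splice per carry step) with a single iterative
-- in-place pass over a copied list; same cost, different decomposition (objective: alternative).

-- ===== PORT A =====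
-- A: recursive — empty → (); carry digit → cycle[0] consed onto the recursive call on the
-- tail; otherwise a copy of v with position 0 replaced by the cycle successor; non-member
-- head → v unchanged. The `.getD 0` defaults are unreachable: the branch guarantees the
-- index and successor exist (argued where they are used).
def odometer (cycle : List Int) (v : List Int) : List Int :=
  match v with
  | [] => []
  | d :: rest =>
    if cycle.contains d then
      -- v[0] == cycle[-1]; cycle is nonempty here, so pyGet? cycle (-1) is some _
      if PySem.List.pyGet? cycle (-1) = some d then
        (PySem.List.pyGet? cycle 0).getD 0 :: odometer cycle rest
      else
        -- target[0] = cycle[cycle.index(v[0]) + 1]; d ∈ cycle and d ≠ cycle[-1], so the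
        -- first occurrence of d is before the last index and index+1 is in range
        ((PySem.List.index? cycle d).bind
            (fun idx => PySem.List.pyGet? cycle ((idx : Int) + 1))).getD 0 :: rest
    else d :: rest

-- ===== PORT B =====
-- B's loop: `for i in range(len(v))`, mutating `result` (initially a copy of v) via set,
-- breaking at the first non-carry digit.
def odoLoop (cycle : List Int) (v : List Int) (result : List Int) (i : Nat) : List Int :=
  if h : i < v.length then
    let d := v[i]
    if cycle.contains d then
      if PySem.List.pyGet? cycle (-1) = some d then
        odoLoop cycle v (result.set i ((PySem.List.pyGet? cycle 0).getD 0)) (i + 1)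
      else
        result.set i (((PySem.List.index? cycle d).bind
            (fun idx => PySem.List.pyGet? cycle ((idx : Int) + 1))).getD 0)
    else result
  else result
termination_by v.length - i

def odometer_alt (cycle : List Int) (v : List Int) : List Int :=
  odoLoop cycle v v 0

-- ===== PRECONDITION & SPEC =====
def Spec_odometer (cycle : List Int) (v : List Int) (out : List Int) : Prop := out = odometer_alt cycle v
instance (cycle : List Int) (v : List Int) (out : List Int) : Decidable (Spec_odometer cycle v out) := by unfold Spec_odometer; infer_instance

-- ===== CLAIM (what is proved, stated in full; the proofs are below) =====
def Claim_equal_odometer : Prop := ∀ (cycle : List Int) (v : List Int), Dom_odometer cycle v → Spec_odometer cycle v (odometer cycle v)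

-- ===== LEMMAS AND PROOFS =====

-- Loop invariant: as long as `result` agrees with `v` from position i on, the loop's value
-- is the untouched prefix of `result` followed by A's recursive value on v's suffix.
lemma odoLoop_eq (cycle : List Int) (v : List Int) :
    ∀ (n i : Nat) (result : List Int), v.length - i ≤ n → result.drop i = v.drop i →
      odoLoop cycle v result i = result.take i ++ odometer cycle (v.drop i) := by
  intro n
  induction n with
  | zero =>
    intro i result hn hdrop
    have hle : v.length ≤ i := by omega
    rw [odoLoop]
    have hvd : v.drop i = [] := List.drop_eq_nil_of_le hle
    have hrl : result.length ≤ i := by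
      have := congrArg List.length hdrop
      simp [List.length_drop] at this
      omega
    simp [Nat.not_lt_of_le hle, hvd, odometer, List.take_of_length_le hrl]
  | succ n ih =>
    intro i result hn hdrop
    by_cases hi : i < v.length
    · have hri : i < result.length := by
        have := congrArg List.length hdrop
        simp [List.length_drop] at this
        omega
      have hvd : v.drop i = v[i] :: v.drop (i + 1) := (List.getElem_cons_drop hi).symm
      have hdrop1 : result.drop (i + 1) = v.drop (i + 1) := by
        rw [← List.drop_drop, ← List.drop_drop, hdrop]
      rw [odoLoop]
      simp only [hi, dif_pos]
      conv_rhs => rw [hvd, odometer]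
      by_cases hc : cycle.contains v[i]
      · by_cases hlast : PySem.List.pyGet? cycle (-1) = some v[i]
        · -- carry step
          rw [if_pos hc, if_pos hc, if_pos hlast, if_pos hlast]
          have hd' : (result.set i ((PySem.List.pyGet? cycle 0).getD 0)).drop (i + 1)
              = v.drop (i + 1) := by
            rw [List.drop_set, if_pos (by omega)]
            exact hdrop1
          rw [ih (i + 1) _ (by omega) hd']
          have htake : (result.set i ((PySem.List.pyGet? cycle 0).getD 0)).take (i + 1)
              = result.take i ++ [(PySem.List.pyGet? cycle 0).getD 0] := by
            rw [List.set_eq_take_cons_drop _ hri, List.take_append]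
            simp [List.length_take, Nat.min_eq_left hri.le]
          rw [htake, List.append_assoc]
          rfl
        · -- successor step: both sides replace position i and stop
          rw [if_pos hc, if_pos hc, if_neg hlast, if_neg hlast]
          rw [List.set_eq_take_cons_drop _ hri, hdrop1]
      · -- non-member digit: both leave everything from i unchanged
        rw [if_neg hc, if_neg hc, ← hvd, ← hdrop, List.take_append_drop]
    · rw [odoLoop]
      have hvd : v.drop i = [] := List.drop_eq_nil_of_le (by omega)
      have hrl : result.length ≤ i := by
        have := congrArg List.length hdrop
        simp [List.length_drop] at this
        omega
      simp [hi, hvd, odometer, List.take_of_length_le hrl]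

-- ===== VERDICT (by name: the statement is the Claim_ definition above) =====
theorem odometer_spec : Claim_equal_odometer := by
  intro cycle v _
  unfold Spec_odometer odometer_alt
  have := odoLoop_eq cycle v v.length 0 v (by omega) rfl
  simpa using this.symm
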